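-- pv_equiv track=rewrite | github.com/Franco414/DASO_C14 | Ejercicios_Extras/Unidad6/Ejercicio_6_3.py | my_function_string_c
-- ===== SOURCE A (Python) =====
-- def my_function_string_c(caracter,cadena,maxRe):
--     lista=[]
--     countRemp=0
--     for i in range(0,len(cadena)):
--         if(cadena[i]>='0' and cadena[i]<='9'):
--             if(countRemp<maxRe):
--                 lista.append(caracter)
--                 countRemp=countRemp+1
--             else:
--                 lista.append(cadena[i])
--         else:
--             lista.append(cadena[i])
--     ret="".join(lista)
--     return ret
-- ===== SOURCE B (Python) =====
-- def my_function_string_c(caracter, cadena, maxRe):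
--     digits = [i for i, ch in enumerate(cadena) if '0' <= ch <= '9']
--     repl = set(digits[:maxRe]) if maxRe > 0 else set()
--     return "".join(caracter if i in repl else ch for i, ch in enumerate(cadena))
-- ===== Notes on version B (the rewrite author's own statement) =====
-- stated objective: alternative
-- what changed: Replaces A's single counter-driven loop by two separate passes: one pass collects the digit positions and slices off the first maxRe of them as a replacement set, a second pass rebuilds the string by membership in that set.
import Mathlib
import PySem

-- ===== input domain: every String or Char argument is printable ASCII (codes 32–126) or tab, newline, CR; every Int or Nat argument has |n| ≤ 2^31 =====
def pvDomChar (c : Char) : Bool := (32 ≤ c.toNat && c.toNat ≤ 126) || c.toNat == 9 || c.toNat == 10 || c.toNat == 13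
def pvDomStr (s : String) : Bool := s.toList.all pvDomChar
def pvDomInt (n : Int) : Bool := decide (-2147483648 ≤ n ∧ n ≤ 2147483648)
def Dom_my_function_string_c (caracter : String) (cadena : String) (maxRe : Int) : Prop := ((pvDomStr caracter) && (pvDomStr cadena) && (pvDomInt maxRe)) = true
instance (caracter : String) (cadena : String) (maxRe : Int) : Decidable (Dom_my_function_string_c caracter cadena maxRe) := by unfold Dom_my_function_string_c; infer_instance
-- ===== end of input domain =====

-- B replaces A's single counter-driven loop by two passes (collect the first maxRe digit
-- positions into a set, then rebuild by membership); objective: alternative decomposition.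

-- ===== PORT A =====
-- shared digit test, Python's `c >= '0' and c <= '9'` (codepoint comparison, same in Lean)
def pvIsDig (c : Char) : Bool := '0' ≤ c && c ≤ '9'

-- one iteration of A's for-loop: state is (lista, countRemp)
def pvStepA (caracter : String) (maxRe : Int) (st : List String × Int) (c : Char) : List String × Int :=
  if pvIsDig c then
    if st.2 < maxRe then (st.1 ++ [caracter], st.2 + 1)
    else (st.1 ++ [String.ofList [c]], st.2)
  else (st.1 ++ [String.ofList [c]], st.2)

def my_function_string_c (caracter : String) (cadena : String) (maxRe : Int) : String :=
  PySem.Str.join "" (cadena.toList.foldl (pvStepA caracter maxRe) ([], 0)).1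

-- ===== PORT B =====
-- first pass of B: the indices of the digit characters (enumerate + filter)
def pvDigitIdx (cs : List Char) (s : Int) : List Int :=
  ((PySem.List.enumerate cs s).filter (fun p => pvIsDig p.2)).map Prod.fst

def my_function_string_c_alt (caracter : String) (cadena : String) (maxRe : Int) : String :=
  PySem.Str.join "" ((PySem.List.enumerate cadena.toList 0).map
    (fun p =>
      if (if 0 < maxRe then
            PySem.Set.ofList (PySem.List.slice (pvDigitIdx cadena.toList 0) none (some maxRe))
          else PySem.Set.empty).contains p.1
      then caracter else String.ofList [p.2]))

-- ===== PRECONDITION & SPEC =====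
def Spec_my_function_string_c (caracter : String) (cadena : String) (maxRe : Int) (out : String) : Prop := out = my_function_string_c_alt caracter cadena maxRe
instance (caracter : String) (cadena : String) (maxRe : Int) (out : String) : Decidable (Spec_my_function_string_c caracter cadena maxRe out) := by unfold Spec_my_function_string_c; infer_instance

-- ===== CLAIM (what is proved, stated in full; the proofs are below) =====
def Claim_equal_my_function_string_c : Prop := ∀ (caracter : String) (cadena : String) (maxRe : Int), Dom_my_function_string_c caracter cadena maxRe → Spec_my_function_string_c caracter cadena maxRe (my_function_string_c caracter cadena maxRe)

-- ===== LEMMAS AND PROOFS =====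

-- canonical "replace while budget positive" list both ports are reduced to
def pvSpecL (caracter : String) : List Char → Int → List String
  | [], _ => []
  | c :: cs, k =>
    if pvIsDig c then
      (if 0 < k then caracter :: pvSpecL caracter cs (k - 1)
       else String.ofList [c] :: pvSpecL caracter cs k)
    else String.ofList [c] :: pvSpecL caracter cs k

lemma pvA_loop (caracter : String) (maxRe : Int) :
    ∀ (cs : List Char) (acc : List String) (cnt : Int),
      (cs.foldl (pvStepA caracter maxRe) (acc, cnt)).1
        = acc ++ pvSpecL caracter cs (maxRe - cnt) := by
  intro cs
  induction cs with
  | nil => intro acc cnt; simp [pvSpecL]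
  | cons c cs ih =>
    intro acc cnt
    by_cases hd : pvIsDig c
    · by_cases hc : cnt < maxRe
      · have h0 : 0 < maxRe - cnt := by omega
        have : maxRe - (cnt + 1) = maxRe - cnt - 1 := by omega
        simp [List.foldl, pvStepA, hd, hc, pvSpecL, ih, this]
      · have h0 : ¬ 0 < maxRe - cnt := by omega
        simp [List.foldl, pvStepA, hd, hc, pvSpecL, ih]
    · simp [List.foldl, pvStepA, hd, pvSpecL, ih]

lemma pvDigitIdx_cons (c : Char) (cs : List Char) (s : Int) :
    pvDigitIdx (c :: cs) s
      = if pvIsDig c then s :: pvDigitIdx cs (s + 1) else pvDigitIdx cs (s + 1) := by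
  by_cases hd : pvIsDig c <;> simp [pvDigitIdx, PySem.List.enumerate_cons, hd]

lemma pvDigitIdx_ge (cs : List Char) (s : Int) :
    ∀ j ∈ pvDigitIdx cs s, s ≤ j := by
  induction cs generalizing s with
  | nil => simp [pvDigitIdx]
  | cons c cs ih =>
    intro j hj
    rw [pvDigitIdx_cons] at hj
    by_cases hd : pvIsDig c
    · simp [hd] at hj
      rcases hj with h | h
      · omega
      · have := ih (s + 1) j h; omega
    · simp [hd] at hj
      have := ih (s + 1) j hj; omega

-- B's replacement set, as the plain list it is on each branch
def pvRepl (cs : List Char) (s k : Int) : List Int :=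
  if 0 < k then (pvDigitIdx cs s).take k.toNat else []

lemma pvRepl_contains (cs : List Char) (s k i : Int) :
    (if 0 < k then PySem.Set.ofList (PySem.List.slice (pvDigitIdx cs s) none (some k))
     else PySem.Set.empty).contains i = (pvRepl cs s k).contains i := by
  by_cases hk : 0 < k
  · have hkn : k = ((k.toNat : Nat) : Int) := by omega
    rw [if_pos hk, pvRepl, if_pos hk, hkn, PySem.List.slice_to_natCast]
    rw [Bool.eq_iff_iff]
    have hm : max k 0 = k := by omega
    simp [PySem.Set.mem_ofList, hm]
  · rw [if_neg hk, pvRepl, if_neg hk]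
    rfl

lemma pvRender_congr (caracter : String) (l : List (Int × Char)) (R R' : List Int)
    (h : ∀ p ∈ l, (R.contains p.1 = R'.contains p.1)) :
    l.map (fun p => if R.contains p.1 then caracter else String.ofList [p.2])
      = l.map (fun p => if R'.contains p.1 then caracter else String.ofList [p.2]) := by
  apply List.map_congr_left
  intro p hp
  rw [h p hp]

lemma pvB_main (caracter : String) :
    ∀ (cs : List Char) (s k : Int),
      (PySem.List.enumerate cs s).map
          (fun p => if (pvRepl cs s k).contains p.1 then caracter else String.ofList [p.2])
        = pvSpecL caracter cs k := by
  intro cs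
  induction cs with
  | nil => intro s k; simp [PySem.List.enumerate_nil, pvSpecL]
  | cons c cs ih =>
    intro s k
    rw [PySem.List.enumerate_cons, List.map_cons]
    have hge : ∀ p ∈ PySem.List.enumerate cs (s + 1), s + 1 ≤ p.1 := by
      intro p hp
      rcases (PySem.List.mem_enumerate_iff _ _ _).1 hp with ⟨j, hj, rfl⟩
      omega
    by_cases hd : pvIsDig c
    · by_cases hk : 0 < k
      · -- head index s is replaced; tail set is the first k-1 digit indices of cs
        have hset : pvRepl (c :: cs) s k
            = s :: (pvDigitIdx cs (s + 1)).take (k - 1).toNat := by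
          rw [pvRepl, if_pos hk, pvDigitIdx_cons, if_pos hd]
          have : k.toNat = (k - 1).toNat + 1 := by omega
          rw [this, List.take_succ_cons]
        have hhead : (pvRepl (c :: cs) s k).contains s = true := by
          rw [hset]; simp
        have htail : ∀ p ∈ PySem.List.enumerate cs (s + 1),
            ((pvRepl (c :: cs) s k).contains p.1 = (pvRepl cs (s + 1) (k - 1)).contains p.1) := by
          intro p hp
          have hps := hge p hp
          rw [hset, pvRepl]
          by_cases hk1 : 0 < k - 1
          · rw [if_pos hk1]
            simp only [List.contains_cons]
            have : (p.1 == s) = false := by simp; omega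
            rw [this, Bool.false_or]
          · have : (k - 1).toNat = 0 := by omega
            rw [if_neg hk1, this, List.take_zero]
            simp only [List.contains_cons, List.contains_nil, Bool.or_false]
            simp; omega
        rw [pvRender_congr caracter _ _ _ htail, ih (s + 1) (k - 1)]
        simp only [hhead]
        simp [pvSpecL, hd, hk]
      · -- no budget: both sets empty
        have hset : pvRepl (c :: cs) s k = [] := by rw [pvRepl, if_neg hk]
        have hset' : pvRepl cs (s + 1) k = [] := by rw [pvRepl, if_neg hk]
        have htail : ∀ p ∈ PySem.List.enumerate cs (s + 1),
            ((pvRepl (c :: cs) s k).contains p.1 = (pvRepl cs (s + 1) k).contains p.1) := by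
          intro p _; rw [hset, hset']
        rw [pvRender_congr caracter _ _ _ htail, ih (s + 1) k]
        simp [pvSpecL, hd, hk, hset]
    · -- non-digit head: index s is in neither set; digit indices unchanged
      have hset : pvRepl (c :: cs) s k = pvRepl cs (s + 1) k := by
        rw [pvRepl, pvRepl, pvDigitIdx_cons, if_neg hd]
      have hhead : (pvRepl (c :: cs) s k).contains s = false := by
        rw [hset, pvRepl]
        by_cases hk : 0 < k
        · rw [if_pos hk]
          by_contra h
          simp only [Bool.not_eq_false, List.contains_eq_mem, decide_eq_true_eq] at h
          have hmem : s ∈ pvDigitIdx cs (s + 1) :=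
            List.mem_of_mem_take h
          have := pvDigitIdx_ge cs (s + 1) s hmem
          omega
        · rw [if_neg hk]; rfl
      rw [hset] at hhead ⊢
      rw [ih (s + 1) k]
      simp only [hhead]
      simp [pvSpecL, hd]

-- ===== VERDICT (by name: the statement is the Claim_ definition above) =====
theorem my_function_string_c_spec : Claim_equal_my_function_string_c := by
  intro caracter cadena maxRe _
  unfold Spec_my_function_string_c my_function_string_c my_function_string_c_alt
  simp only [pvRepl_contains]
  rw [pvA_loop caracter maxRe cadena.toList [] 0, pvB_main caracter cadena.toList 0 maxRe]
  simp
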